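-- pv_equiv track=rewrite | github.com/ozkayas/leetcode_solutions | 9999-A2Z-OA/Count Faults.py | countFaults
-- ===== SOURCE A (Python) =====
-- from collections import defaultdict
--
-- def countFaults(logs) -> int:
--     replacements = 0
--     freq = defaultdict(int)
--     for log in logs:
--         serverId, status = log.split(" ")
--         if status == 'success':
--             freq[serverId] = 0
--         else:
--             freq[serverId] += 1
--         if freq[serverId] == 3:
--             replacements += 1
--             freq[serverId] = 0
--
--     return replacements
-- ===== SOURCE B (Python) =====
-- def countFaults(logs) -> int:
--     # Phase 1: parse every log (same unpack as A, so a malformed line raises at the same point).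
--     pairs = []
--     for log in logs:
--         serverId, status = log.split(" ")
--         pairs.append((serverId, status))
--     # Phase 2: each server's replacement count is independent; scan per distinct server.
--     total = 0
--     seen = set()
--     for serverId, _ in pairs:
--         if serverId in seen:
--             continue
--         seen.add(serverId)
--         run = 0
--         for s, st in pairs:
--             if s != serverId:
--                 continue
--             if st == 'success':
--                 run = 0
--             else:
--                 run += 1
--                 if run == 3:
--                     total += 1
--                     run = 0
--     return total
-- ===== Notes on version B (the rewrite author's own statement) =====
-- stated objective: alternative
-- what changed: B replaces A's single pass with one shared per-server counter dict by a two-phase decomposition: parse all logs once, then for each distinct server run an independent consecutive-failure scan over its own statuses and sum the per-server replacement counts.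
import Mathlib
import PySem

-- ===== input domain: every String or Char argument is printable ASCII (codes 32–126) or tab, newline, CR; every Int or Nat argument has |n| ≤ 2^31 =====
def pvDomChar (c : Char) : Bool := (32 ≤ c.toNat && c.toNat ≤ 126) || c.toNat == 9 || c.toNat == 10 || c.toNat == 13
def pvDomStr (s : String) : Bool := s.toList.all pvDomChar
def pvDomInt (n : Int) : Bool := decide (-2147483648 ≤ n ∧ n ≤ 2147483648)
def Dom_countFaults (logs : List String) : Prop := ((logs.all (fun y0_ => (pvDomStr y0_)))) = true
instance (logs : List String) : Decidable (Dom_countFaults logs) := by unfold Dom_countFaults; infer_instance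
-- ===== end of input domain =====

-- B replaces A's single-pass shared counter dict by a two-phase decomposition (parse, then an
-- independent consecutive-failure scan per distinct server); not faster, an alternative of similar cost.


-- ===== PORT A =====
-- A: one pass, dict serverId -> consecutive-failure counter, reset & count at 3.
def countFaults (logs : List String) : Int :=
  (logs.foldl (fun (acc : Int × PySem.Dict String Int) log =>
      let parts := (PySem.Str.split? log " ").getD []
      let serverId := parts.getD 0 ""
      let status := parts.getD 1 ""
      let freq := if status == "success" then acc.2.insert serverId 0
                  else acc.2.insert serverId (acc.2.getD serverId 0 + 1)
      if freq.getD serverId 0 == 3 then (acc.1 + 1, freq.insert serverId 0)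
      else (acc.1, freq))
    (0, PySem.Dict.empty)).1

-- ===== PORT B =====
def parsePair (log : String) : String × String :=
  let parts := (PySem.Str.split? log " ").getD []
  (parts.getD 0 "", parts.getD 1 "")

-- B's inner loop: scan all pairs, keeping only server `sid`, with a (total, run) state.
def innerScan (pairs : List (String × String)) (sid : String) (st : Int × Int) : Int × Int :=
  pairs.foldl (fun (st : Int × Int) q =>
      if q.1 ≠ sid then st
      else if q.2 == "success" then (st.1, 0)
      else if st.2 + 1 == 3 then (st.1 + 1, 0)
      else (st.1, st.2 + 1)) st

def countFaults_alt (logs : List String) : Int :=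
  let pairs := logs.map parsePair
  (pairs.foldl (fun (acc : Int × PySem.Set String) p =>
      if acc.2.contains p.1 then acc
      else ((innerScan pairs p.1 (acc.1, 0)).1, acc.2.add p.1))
    (0, PySem.Set.empty)).1

-- ===== PRECONDITION & SPEC =====
-- Pre_ excludes exactly the logs on which A's 2-tuple unpack of log.split(" ") raises ValueError
-- (B raises identically there).
def Pre_countFaults (logs : List String) : Prop :=
  ∀ log ∈ logs, ((PySem.Str.split? log " ").getD []).length = 2
instance (logs : List String) : Decidable (Pre_countFaults logs) := by unfold Pre_countFaults; infer_instance
def pvWitness_countFaults : List String := ["1 fail", "1 fail", "2 success", "1 fail"]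

def Spec_countFaults (logs : List String) (out : Int) : Prop := out = countFaults_alt logs
instance (logs : List String) (out : Int) : Decidable (Spec_countFaults logs out) := by unfold Spec_countFaults; infer_instance

-- ===== CLAIM (what is proved, stated in full; the proofs are below) =====
def Claim_equal_countFaults : Prop := ∀ (logs : List String), Dom_countFaults logs → Pre_countFaults logs → Spec_countFaults logs (countFaults logs)

-- ===== LEMMAS AND PROOFS =====

-- replacement count of one server's status sequence, starting from counter c
def countRun (c : Int) : List String → Int
  | [] => 0
  | st :: rest =>
      if st == "success" then countRun 0 rest
      else if c + 1 == 3 then 1 + countRun 0 rest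
      else countRun (c + 1) rest

def statusesOf (sid : String) (pairs : List (String × String)) : List String :=
  (pairs.filter (fun q => q.1 == sid)).map (·.2)

theorem innerScan_cons (p : String × String) (rest : List (String × String))
    (sid : String) (st : Int × Int) :
    innerScan (p :: rest) sid st = innerScan rest sid
      (if p.1 ≠ sid then st
       else if p.2 == "success" then (st.1, 0)
       else if st.2 + 1 == 3 then (st.1 + 1, 0) else (st.1, st.2 + 1)) := rfl

theorem innerScan_eq (pairs : List (String × String)) (sid : String) :
    ∀ (t c : Int), (innerScan pairs sid (t, c)).1 = t + countRun c (statusesOf sid pairs) := by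
  induction pairs with
  | nil => intro t c; simp [innerScan, statusesOf, countRun]
  | cons p rest ih =>
    intro t c
    rw [innerScan_cons]
    by_cases h : p.1 = sid
    · rw [if_neg (by simp [h])]
      have hfil : statusesOf sid (p :: rest) = p.2 :: statusesOf sid rest := by
        simp [statusesOf, h]
      rw [hfil]
      by_cases hs : p.2 == "success"
      · rw [if_pos hs, ih]; simp [countRun, hs]
      · by_cases h3 : c + 1 = 3
        · rw [if_neg hs, if_pos (by simp [h3]), ih]; simp [countRun, hs, h3]; ring
        · rw [if_neg hs, if_neg (by simp [h3]), ih]; simp [countRun, hs, h3]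
    · rw [if_pos (by simp [h])]
      have hfil : statusesOf sid (p :: rest) = statusesOf sid rest := by
        simp [statusesOf, show (p.1 == sid) = false by simpa using h]
      rw [hfil, ih]

-- one A-step on server sid's counter matches one countRun step
theorem countRun_step (st : String) (c : Int) (rest : List String) :
    countRun c (st :: rest) =
      (if (if st == "success" then (0:Int) else c + 1) == 3 then 1 else 0) +
      countRun (if (if st == "success" then (0:Int) else c + 1) == 3 then 0
                else if st == "success" then 0 else c + 1) rest := by
  by_cases hs : st == "success"
  · simp [countRun, hs]
  · by_cases h3 : c + 1 = 3 <;> simp [countRun, hs, h3]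

-- sums over a nodup list: changing the value at one member by δ
theorem sum_update_one {α : Type} [DecidableEq α] (f g : α → Int) (δ : Int) :
    ∀ (S : List α) (x : α), S.Nodup → x ∈ S → (∀ y ∈ S, y ≠ x → f y = g y) →
      f x = δ + g x → (S.map f).sum = δ + (S.map g).sum := by
  intro S
  induction S with
  | nil => intro x _ hx; simp at hx
  | cons a rest ih =>
    intro x hnd hx hagree hfx
    rcases List.mem_cons.mp hx with h | h
    · subst h
      have : ∀ y ∈ rest, f y = g y := by
        intro y hy
        exact hagree y (List.mem_cons_of_mem _ hy) (fun he => (List.nodup_cons.mp hnd).1 (he ▸ hy))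
      have hsum : (rest.map f).sum = (rest.map g).sum := by
        have : rest.map f = rest.map g := List.map_congr_left this
        rw [this]
      simp only [List.map, List.sum_cons, hfx, hsum]; ring
    · have hax : a ≠ x := fun he => (List.nodup_cons.mp hnd).1 (he ▸ h)
      have := ih x (List.nodup_cons.mp hnd).2 h
        (fun y hy => hagree y (List.mem_cons_of_mem _ hy)) hfx
      simp only [List.map, List.sum_cons, this, hagree a List.mem_cons_self hax]; ring

def aStep (acc : Int × PySem.Dict String Int) (log : String) : Int × PySem.Dict String Int :=
  let parts := (PySem.Str.split? log " ").getD []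
  let serverId := parts.getD 0 ""
  let status := parts.getD 1 ""
  let freq := if status == "success" then acc.2.insert serverId 0
              else acc.2.insert serverId (acc.2.getD serverId 0 + 1)
  if freq.getD serverId 0 == 3 then (acc.1 + 1, freq.insert serverId 0)
  else (acc.1, freq)

theorem aStep_eq (r : Int) (d : PySem.Dict String Int) (log : String) :
    aStep (r, d) log =
      (r + (if (if (parsePair log).2 == "success" then (0:Int)
                else d.getD (parsePair log).1 0 + 1) == 3 then 1 else 0),
       d.insert (parsePair log).1
         (if (if (parsePair log).2 == "success" then (0:Int)
                else d.getD (parsePair log).1 0 + 1) == 3 then 0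
          else if (parsePair log).2 == "success" then 0 else d.getD (parsePair log).1 0 + 1)) := by
  simp only [aStep, parsePair]
  set s0 := ((PySem.Str.split? log " ").getD []).getD 0 ""
  set st0 := ((PySem.Str.split? log " ").getD []).getD 1 ""
  by_cases hs : st0 == "success"
  · simp [hs, PySem.Dict.getD_insert_self]
  · by_cases h3 : d.getD s0 0 + 1 = 3
    · simp [hs, h3, PySem.Dict.getD_insert_self, PySem.Dict.insert_insert_self]
    · have h3' : ((d.getD s0 0 + 1) == 3) = false := by simpa using h3
      simp [hs, h3', PySem.Dict.getD_insert_self]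

-- A's fold equals r plus the per-server countRun contributions, summed over any
-- nodup list S containing all servers of logs.
theorem aFold_eq (S : List String) (hnd : S.Nodup) :
    ∀ (logs : List String) (r : Int) (d : PySem.Dict String Int),
      (∀ log ∈ logs, (parsePair log).1 ∈ S) →
      (logs.foldl aStep (r, d)).1 =
        r + (S.map (fun s => countRun (d.getD s 0) (statusesOf s (logs.map parsePair)))).sum := by
  intro logs
  induction logs with
  | nil =>
    intro r d _
    have : ∀ s, countRun (d.getD s 0) (statusesOf s ([] : List (String × String))) = 0 := by
      intro s; simp [statusesOf, countRun]
    simp [this]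
  | cons log rest ih =>
    intro r d hmem
    have hs0S : (parsePair log).1 ∈ S := hmem log List.mem_cons_self
    set s0 := (parsePair log).1 with hs0
    set st0 := (parsePair log).2 with hst0
    set c := d.getD s0 0 with hc
    set c1 : Int := if st0 == "success" then 0 else c + 1 with hc1
    set δ : Int := if c1 == 3 then 1 else 0 with hδ
    set c' : Int := if c1 == 3 then 0 else c1 with hc'
    rw [List.foldl_cons, aStep_eq,
      ih (r + δ) (d.insert s0 c') (fun l hl => hmem l (List.mem_cons_of_mem _ hl))]
    have hsum :
        (S.map (fun s => countRun (d.getD s 0) (statusesOf s ((log :: rest).map parsePair)))).sum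
          = δ + (S.map (fun s => countRun ((d.insert s0 c').getD s 0)
                (statusesOf s (rest.map parsePair)))).sum := by
      apply sum_update_one _ _ δ S s0 hnd hs0S
      · intro y hy hne
        have h1 : statusesOf y ((log :: rest).map parsePair)
            = statusesOf y (rest.map parsePair) := by
          simp only [statusesOf, List.map_cons, List.filter_cons, beq_iff_eq]
          rw [if_neg (Ne.symm hne)]
        have h2 : (d.insert s0 c').getD y 0 = d.getD y 0 := by
          rw [PySem.Dict.getD_insert]; simp [hne]
        rw [h1, h2]
      · have h1 : statusesOf s0 ((log :: rest).map parsePair)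
            = st0 :: statusesOf s0 (rest.map parsePair) := by
          simp only [statusesOf, List.map_cons, List.filter_cons, beq_iff_eq]
          rw [if_pos rfl, List.map_cons]
        have h2 : (d.insert s0 c').getD s0 0 = c' := PySem.Dict.getD_insert_self d s0 c' 0
        rw [h1, h2, countRun_step, ← hc, ← hc1, ← hδ, ← hc']
    rw [hsum]; ring

-- B's outer fold: newly seen servers, in order
def newServers (seen : PySem.Set String) : List (String × String) → List String
  | [] => []
  | p :: rest =>
      if seen.contains p.1 then newServers seen rest
      else p.1 :: newServers (seen.add p.1) rest

theorem mem_newServers (x : String) :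
    ∀ (pairs : List (String × String)) (seen : PySem.Set String),
      x ∈ newServers seen pairs ↔ (x ∈ pairs.map (·.1) ∧ x ∉ seen) := by
  intro pairs
  induction pairs with
  | nil => intro seen; simp [newServers]
  | cons p rest ih =>
    intro seen
    by_cases h : p.1 ∈ seen
    · rw [show newServers seen (p :: rest) = newServers seen rest by
        simp [newServers, h], ih]
      simp only [List.map_cons, List.mem_cons]
      constructor
      · rintro ⟨h1, h2⟩; exact ⟨Or.inr h1, h2⟩
      · rintro ⟨h1 | h1, h2⟩
        · exact absurd (h1 ▸ h) h2
        · exact ⟨h1, h2⟩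
    · rw [show newServers seen (p :: rest) = p.1 :: newServers (seen.add p.1) rest by
        simp [newServers, h]]
      simp only [List.mem_cons, ih, List.map_cons, PySem.Set.mem_add]
      constructor
      · rintro (h1 | ⟨h1, h2⟩)
        · exact ⟨Or.inl h1, h1 ▸ h⟩
        · exact ⟨Or.inr h1, fun hc => h2 (Or.inl hc)⟩
      · rintro ⟨h1 | h1, h2⟩
        · exact Or.inl h1
        · by_cases hx : x = p.1
          · exact Or.inl hx
          · exact Or.inr ⟨h1, fun hc => hc.elim h2 hx⟩

theorem nodup_newServers :
    ∀ (pairs : List (String × String)) (seen : PySem.Set String),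
      (newServers seen pairs).Nodup := by
  intro pairs
  induction pairs with
  | nil => intro seen; simp [newServers]
  | cons p rest ih =>
    intro seen
    by_cases h : p.1 ∈ seen
    · rw [show newServers seen (p :: rest) = newServers seen rest by
        simp [newServers, h]]
      exact ih seen
    · rw [show newServers seen (p :: rest) = p.1 :: newServers (seen.add p.1) rest by
        simp [newServers, h]]
      refine List.nodup_cons.mpr ⟨fun hmem => ?_, ih _⟩
      exact ((mem_newServers p.1 rest (seen.add p.1)).mp hmem).2
        ((PySem.Set.mem_add _ _ _).mpr (Or.inr rfl))

theorem bFold_eq (pairs : List (String × String)) :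
    ∀ (rest : List (String × String)) (t : Int) (seen : PySem.Set String),
      (rest.foldl (fun (acc : Int × PySem.Set String) p =>
          if acc.2.contains p.1 then acc
          else ((innerScan pairs p.1 (acc.1, 0)).1, acc.2.add p.1)) (t, seen)).1
        = t + ((newServers seen rest).map (fun s => countRun 0 (statusesOf s pairs))).sum := by
  intro rest
  induction rest with
  | nil => intro t seen; simp [newServers]
  | cons p r ih =>
    intro t seen
    by_cases h : seen.contains p.1
    · have hm : p.1 ∈ seen := by simpa using h
      rw [List.foldl_cons, if_pos h,
        show newServers seen (p :: r) = newServers seen r by simp [newServers, hm]]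
      exact ih t seen
    · have hm : p.1 ∉ seen := by simpa using h
      rw [List.foldl_cons, if_neg h,
        show newServers seen (p :: r) = p.1 :: newServers (seen.add p.1) r by
          simp [newServers, hm]]
      rw [ih (innerScan pairs p.1 (t, 0)).1 (seen.add p.1), innerScan_eq pairs p.1 t 0]
      simp only [List.map_cons, List.sum_cons]
      ring

-- ===== VERDICT (by name: the statement is the Claim_ definition above) =====
theorem countFaults_spec : Claim_equal_countFaults := by
  intro logs _ _
  show countFaults logs = countFaults_alt logs
  have hB : countFaults_alt logs =
      0 + ((newServers PySem.Set.empty (logs.map parsePair)).map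
        (fun s => countRun 0 (statusesOf s (logs.map parsePair)))).sum := by
    simpa [countFaults_alt] using
      bFold_eq (logs.map parsePair) (logs.map parsePair) 0 PySem.Set.empty
  have hA : countFaults logs = (logs.foldl aStep (0, PySem.Dict.empty)).1 := rfl
  rw [hA, hB, aFold_eq (newServers PySem.Set.empty (logs.map parsePair))
      (nodup_newServers _ _) logs 0 PySem.Dict.empty ?_]
  · simp [PySem.Dict.getD_empty]
  · intro log hl
    rw [mem_newServers]
    refine ⟨by simpa using ⟨log, hl, rfl⟩, by simp [PySem.Set.empty]⟩
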